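-- pv_equiv track=rewrite | github.com/chekirou/Constraint_Learning | utils.py | misplaced_2
-- ===== SOURCE A (Python) =====
-- def misplaced_2(instantiation,proposition):
--     a ,b ,misplaced= instantiation.copy(), proposition.copy(), 0
--     indexes = []
--     for index ,variable in enumerate(b):
--       if variable == a[index] or variable == -1:
--         a[index] = -1
--         b[index] = -1
--     for index ,variable in enumerate(b):
--       i=0
--       if variable != -1:
--         while i < len(a) and a[i] != variable:
--           i+=1
--         if i < len(a):
--           a[i]=-1
--           indexes.append(index)
--           misplaced +=1
--     return indexes, misplaced
-- ===== SOURCE B (Python) =====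
-- def misplaced_2(instantiation, proposition):
--     n = len(proposition)
--     counts = {}
--     for i, x in enumerate(instantiation):
--         if not (i < n and (proposition[i] == x or proposition[i] == -1)):
--             counts[x] = counts.get(x, 0) + 1
--     indexes = []
--     for i, v in enumerate(proposition):
--         if v != -1 and v != instantiation[i] and counts.get(v, 0) > 0:
--             counts[v] -= 1
--             indexes.append(i)
--     return indexes, len(indexes)
-- ===== Notes on version B (the rewrite author's own statement) =====
-- stated objective: faster
-- what changed: Replaces A's inner linear re-scan of the candidate list for each proposition element with a value->count dictionary built in one pass and decremented during a single pass over the proposition.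
import Mathlib
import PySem

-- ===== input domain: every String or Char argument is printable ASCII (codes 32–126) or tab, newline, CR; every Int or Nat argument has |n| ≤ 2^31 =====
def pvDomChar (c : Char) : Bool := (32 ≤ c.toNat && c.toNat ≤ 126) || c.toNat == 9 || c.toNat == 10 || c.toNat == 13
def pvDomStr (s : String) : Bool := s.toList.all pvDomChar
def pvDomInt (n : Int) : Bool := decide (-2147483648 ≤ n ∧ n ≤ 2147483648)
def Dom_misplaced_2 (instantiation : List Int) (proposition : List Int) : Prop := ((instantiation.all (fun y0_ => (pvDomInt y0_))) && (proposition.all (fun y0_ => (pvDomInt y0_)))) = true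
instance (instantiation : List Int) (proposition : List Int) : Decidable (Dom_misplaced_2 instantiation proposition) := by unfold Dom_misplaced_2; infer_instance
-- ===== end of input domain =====

-- B replaces A's per-element linear re-scan of the candidate list with a value→count
-- dictionary built once and decremented in a single pass (objective: faster).
-- A mutates only its local copies, so return-value equivalence is full equivalence.

-- ===== PORT A =====
-- the 'while i < len(a) and a[i] != variable: i += 1' loop of A
def mfind (a : List Int) (v : Int) (i : Nat) : Nat :=
  if h : i < a.length ∧ a.getD i 0 ≠ v then mfind a v (i + 1) else i
termination_by a.length - i
decreasing_by omega

def misplaced_2 (instantiation : List Int) (proposition : List Int) : List Int × Int :=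
  -- first loop: mark exact matches and -1s in both copies
  let ab := (PySem.List.enumerate proposition 0).foldl
    (fun (s : List Int × List Int) (p : Int × Int) =>
      if p.2 = PySem.List.pyGetD s.1 p.1 0 ∨ p.2 = -1 then
        (PySem.List.pySetD s.1 p.1 (-1), PySem.List.pySetD s.2 p.1 (-1))
      else s)
    (instantiation, proposition)
  -- second loop: for each surviving b-value, linear search in a
  let r := (PySem.List.enumerate ab.2 0).foldl
    (fun (s : List Int × List Int × Int) (p : Int × Int) =>
      if p.2 ≠ -1 then
        let i := mfind s.1 p.2 0
        if i < s.1.length then (s.1.set i (-1), s.2.1 ++ [p.1], s.2.2 + 1)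
        else s
      else s)
    (ab.1, ([], 0))
  (r.2.1, r.2.2)

-- ===== PORT B =====
def misplaced_2_alt (instantiation : List Int) (proposition : List Int) : List Int × Int :=
  let n : Int := proposition.length
  -- counts of instantiation values not consumed by an exact/-1 match
  let counts := (PySem.List.enumerate instantiation 0).foldl
    (fun (c : PySem.Dict Int Int) (p : Int × Int) =>
      if ¬ (p.1 < n ∧ (PySem.List.pyGetD proposition p.1 0 = p.2 ∨ PySem.List.pyGetD proposition p.1 0 = -1)) then
        c.insert p.2 (c.getD p.2 0 + 1)
      else c)
    PySem.Dict.empty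
  -- single pass over proposition, decrementing the counter
  let r := (PySem.List.enumerate proposition 0).foldl
    (fun (s : PySem.Dict Int Int × List Int) (p : Int × Int) =>
      if p.2 ≠ -1 ∧ p.2 ≠ PySem.List.pyGetD instantiation p.1 0 ∧ s.1.getD p.2 0 > 0 then
        (s.1.insert p.2 (s.1.getD p.2 0 - 1), s.2 ++ [p.1])
      else s)
    (counts, [])
  (r.2, (r.2.length : Int))

-- ===== PRECONDITION & SPEC =====
-- Pre_ excludes exactly the inputs where A raises IndexError: a proposition longer
-- than the instantiation (A reads a[index] for every index of b).
def Pre_misplaced_2 (instantiation : List Int) (proposition : List Int) : Prop :=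
  proposition.length ≤ instantiation.length
instance (instantiation : List Int) (proposition : List Int) : Decidable (Pre_misplaced_2 instantiation proposition) := by unfold Pre_misplaced_2; infer_instance

def pvWitness_misplaced_2 : List Int × List Int := ([1, 2, 3, 4], [2, 1, 3, 5])

def Spec_misplaced_2 (instantiation : List Int) (proposition : List Int) (out : List Int × Int) : Prop := out = misplaced_2_alt instantiation proposition
instance (instantiation : List Int) (proposition : List Int) (out : List Int × Int) : Decidable (Spec_misplaced_2 instantiation proposition out) := by unfold Spec_misplaced_2; infer_instance

-- ===== CLAIM (what is proved, stated in full; the proofs are below) =====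
def Claim_equal_misplaced_2 : Prop := ∀ (instantiation : List Int) (proposition : List Int), Dom_misplaced_2 instantiation proposition → Pre_misplaced_2 instantiation proposition → Spec_misplaced_2 instantiation proposition (misplaced_2 instantiation proposition)

-- ===== LEMMAS AND PROOFS =====

-- a after the first loop: positions matched against b become -1, tail kept
def amaskB (e d : List Int) : List Int :=
  ((e.zip d).map (fun p => if p.2 = p.1 ∨ p.2 = -1 then -1 else p.1)) ++ e.drop d.length

-- b after the first loop
def maskB (d e : List Int) : List Int :=
  (d.zip e).map (fun p => if p.1 = p.2 ∨ p.1 = -1 then -1 else p.1)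

theorem amaskB_nil_left (d : List Int) : amaskB [] d = [] := by simp [amaskB]

theorem amaskB_nil_right (e : List Int) : amaskB e [] = e := by simp [amaskB]

theorem amaskB_cons (x y : Int) (e d : List Int) :
    amaskB (x :: e) (y :: d) = (if y = x ∨ y = -1 then -1 else x) :: amaskB e d := by
  simp [amaskB]

theorem maskB_nil (e : List Int) : maskB [] e = [] := by simp [maskB]

theorem maskB_cons (x y : Int) (e d : List Int) :
    maskB (y :: d) (x :: e) = (if y = x ∨ y = -1 then -1 else y) :: maskB d e := by
  simp [maskB]

theorem set_take_succ (l : List Int) (n : Nat) (x : Int) (h : n < l.length) :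
    (l.set n x).take (n+1) = l.take n ++ [x] := by
  rw [List.set_eq_take_cons_drop _ h]
  have hl : (l.take n).length = n := List.length_take_of_le (Nat.le_of_lt h)
  rw [show n + 1 = (l.take n).length + 1 by omega, List.take_append]
  simp

theorem set_drop_lt (l : List Int) (n m : Nat) (x : Int) (h : n < m) :
    (l.set n x).drop m = l.drop m := by
  rw [List.drop_set]; simp [show ¬ (m ≤ n) by omega]

theorem take_succ_getElem (l : List Int) (n : Nat) (h : n < l.length) :
    l.take (n+1) = l.take n ++ [l[n]] := by
  rw [List.take_add_one]
  simp [List.getElem?_eq_getElem h]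

theorem count_set_eq (l : List Int) (n : Nat) (h : n < l.length) (x v : Int) :
    (l.set n x).count v + (if l[n] = v then 1 else 0)
      = l.count v + (if x = v then 1 else 0) := by
  induction l generalizing n with
  | nil => simp at h
  | cons y l ih =>
    cases n with
    | zero => simp [List.count_cons]; split_ifs <;> omega
    | succ n =>
      have h' : n < l.length := by simp at h; omega
      have := ih n h'
      simp [List.count_cons] at this ⊢
      split_ifs at this ⊢ <;> omega

theorem pass1_spec (c : List Int) : ∀ (k : Nat) (a b : List Int),
    k + c.length ≤ a.length → k + c.length ≤ b.length →
    (∀ j, j < c.length → getElem? b (k + j) = getElem? c j) →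
    (PySem.List.enumerate c (k : Int)).foldl
      (fun (s : List Int × List Int) (p : Int × Int) =>
        if p.2 = PySem.List.pyGetD s.1 p.1 0 ∨ p.2 = -1 then
          (PySem.List.pySetD s.1 p.1 (-1), PySem.List.pySetD s.2 p.1 (-1))
        else s)
      (a, b)
    = (a.take k ++ amaskB (a.drop k) c,
       b.take k ++ maskB c (a.drop k) ++ b.drop (k + c.length)) := by
  induction c with
  | nil =>
    intro k a b _ _ _
    simp [PySem.List.enumerate, amaskB_nil_right, maskB_nil]
  | cons v c' ih =>
    intro k a b hka hkb hb
    have hk : k < a.length := by simp at hka; omega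
    have hkb' : k < b.length := by simp at hkb; omega
    rw [PySem.List.enumerate_cons, List.foldl_cons]
    have hdropa : a.drop k = a[k] :: a.drop (k+1) := List.drop_eq_getElem_cons hk
    have hbk : b[k]? = some v := by
      have := hb 0 (by simp)
      simpa using this
    simp only [PySem.List.pyGetD_natCast, PySem.List.pySetD_natCast]
    have hgetD : a.getD k 0 = a[k] := List.getD_eq_getElem a 0 hk
    by_cases hcond : v = a.getD k 0 ∨ v = -1
    · rw [if_pos hcond]
      rw [show (k : Int) + 1 = ((k + 1 : Nat) : Int) by push_cast; ring]
      rw [ih (k+1) (a.set k (-1)) (b.set k (-1)) (by simp at hka ⊢; omega)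
        (by simp at hkb ⊢; omega)
        (by
          intro j hj
          rw [List.getElem?_set_ne (by omega)]
          have := hb (1 + j) (by simp; omega)
          rw [show k + (1 + j) = k + 1 + j by omega, show 1 + j = j + 1 by omega] at this
          simpa using this)]
      rw [set_take_succ _ _ _ hk, set_drop_lt _ _ _ _ (by omega),
        set_take_succ _ _ _ hkb', set_drop_lt _ _ _ _ (by omega),
        hdropa, amaskB_cons, maskB_cons]
      rw [if_pos (by rw [hgetD] at hcond; exact hcond), if_pos (by rw [hgetD] at hcond; exact hcond)]
      rw [show k + (v :: c').length = k + 1 + c'.length by simp; omega]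
      simp
    · rw [if_neg hcond]
      rw [show (k : Int) + 1 = ((k + 1 : Nat) : Int) by push_cast; ring]
      rw [ih (k+1) a b (by simp at hka ⊢; omega) (by simp at hkb ⊢; omega)
        (by
          intro j hj
          have := hb (1 + j) (by simp; omega)
          rw [show k + (1 + j) = k + 1 + j by omega, show 1 + j = j + 1 by omega] at this
          simpa using this)]
      rw [take_succ_getElem _ _ hk, take_succ_getElem _ _ hkb',
        hdropa, amaskB_cons, maskB_cons]
      rw [if_neg (by rw [hgetD] at hcond; exact hcond), if_neg (by rw [hgetD] at hcond; exact hcond)]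
      have : b[k] = v := by
        have := List.getElem?_eq_getElem hkb'
        rw [hbk] at this
        exact (Option.some_inj.mp this).symm
      rw [this]
      rw [show k + (v :: c').length = k + 1 + c'.length by simp; omega]
      simp
      rw [take_succ_getElem _ _ hk, List.append_assoc, List.singleton_append]

theorem counts_spec (proposition : List Int) (xs : List Int) : ∀ (k : Nat) (c : PySem.Dict Int Int),
    ∀ v, v ≠ -1 →
    ((PySem.List.enumerate xs (k : Int)).foldl
      (fun (c : PySem.Dict Int Int) (p : Int × Int) =>
        if ¬ (p.1 < (proposition.length : Int) ∧ (PySem.List.pyGetD proposition p.1 0 = p.2 ∨ PySem.List.pyGetD proposition p.1 0 = -1)) then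
          c.insert p.2 (c.getD p.2 0 + 1)
        else c)
      c).getD v 0
    = c.getD v 0 + ((amaskB xs (proposition.drop k)).count v : Int) := by
  induction xs with
  | nil =>
    intro k c v hv
    simp [PySem.List.enumerate, amaskB_nil_left]
  | cons x xs' ih =>
    intro k c v hv
    rw [PySem.List.enumerate_cons, List.foldl_cons]
    rw [show (k : Int) + 1 = ((k + 1 : Nat) : Int) by push_cast; ring]
    simp only [PySem.List.pyGetD_natCast]
    by_cases hk : k < proposition.length
    · have hdrop : proposition.drop k = proposition[k] :: proposition.drop (k+1) :=
        List.drop_eq_getElem_cons hk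
      have hgetD : proposition.getD k 0 = proposition[k] := List.getD_eq_getElem _ 0 hk
      have hklt : ((k : Int) < (proposition.length : Int)) := by exact_mod_cast hk
      by_cases hm : proposition.getD k 0 = x ∨ proposition.getD k 0 = -1
      · rw [if_neg (not_not_intro ⟨hklt, hm⟩)]
        rw [ih (k+1) c v hv, hdrop, amaskB_cons]
        rw [if_pos (by rw [hgetD] at hm; exact hm)]
        simp [List.count_cons, hv.symm]
      · rw [if_pos (fun hc => hm hc.2)]
        rw [ih (k+1) (c.insert x (c.getD x 0 + 1)) v hv, hdrop, amaskB_cons]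
        rw [if_neg (by rw [hgetD] at hm; exact hm)]
        rw [PySem.Dict.getD_insert]
        by_cases hvx : v = x
        · subst hvx
          simp [List.count_cons]
          push_cast
          ring
        · rw [if_neg hvx]
          simp [List.count_cons, hvx]
          intro h; exact absurd h.symm hvx
    · have hdrop : proposition.drop k = [] := List.drop_eq_nil_of_le (by omega)
      have hdrop' : proposition.drop (k+1) = [] := List.drop_eq_nil_of_le (by omega)
      rw [if_pos (fun hc => absurd (by exact_mod_cast hc.1 : k < proposition.length) hk)]
      rw [ih (k+1) (c.insert x (c.getD x 0 + 1)) v hv, hdrop, hdrop',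
        amaskB_nil_right, amaskB_nil_right]
      rw [PySem.Dict.getD_insert]
      by_cases hvx : v = x
      · subst hvx
        simp [List.count_cons]
        push_cast
        ring
      · rw [if_neg hvx]
        simp [List.count_cons, hvx]
        intro h; exact absurd h.symm hvx

theorem mfind_not_mem (a : List Int) (v : Int) : ∀ i, i ≤ a.length →
    (∀ j, i ≤ j → (hj : j < a.length) → a[j] ≠ v) → mfind a v i = a.length := by
  suffices H : ∀ n i, a.length - i = n → i ≤ a.length →
      (∀ j, i ≤ j → (hj : j < a.length) → a[j] ≠ v) → mfind a v i = a.length by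
    intro i; exact H _ i rfl
  intro n
  induction n with
  | zero =>
    intro i h0 hi _
    rw [mfind, dif_neg]
    · omega
    · intro hcon; omega
  | succ n ih =>
    intro i h0 hi h
    rw [mfind]
    split
    · rename_i hc
      exact ih (i + 1) (by omega) (by omega) (fun j hj hjl => h j (by omega) hjl)
    · rename_i hc
      by_cases hil : i < a.length
      · exfalso
        have : a.getD i 0 = v := by by_contra hne; exact hc ⟨hil, hne⟩
        rw [List.getD_eq_getElem a 0 hil] at this
        exact h i le_rfl hil this
      · omega

theorem mfind_found (a : List Int) (v : Int) : ∀ i,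
    (∃ j, i ≤ j ∧ ∃ hj : j < a.length, a[j] = v) →
    ∃ hm : mfind a v i < a.length, a[mfind a v i]'hm = v := by
  suffices H : ∀ n i, a.length - i = n →
      (∃ j, i ≤ j ∧ ∃ hj : j < a.length, a[j] = v) →
      ∃ hm : mfind a v i < a.length, a[mfind a v i]'hm = v by
    intro i; exact H _ i rfl
  intro n
  induction n with
  | zero =>
    intro i h0 hex
    obtain ⟨j, hij, hj, _⟩ := hex
    omega
  | succ n ih =>
    intro i h0 hex
    rw [mfind]
    split
    · rename_i hc
      apply ih (i + 1) (by omega)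
      obtain ⟨j, hij, hj, hv⟩ := hex
      refine ⟨j, ?_, hj, hv⟩
      rcases Nat.eq_or_lt_of_le hij with heq | hlt
      · exfalso
        have := hc.2
        rw [List.getD_eq_getElem a 0 hc.1] at this
        subst heq
        exact this hv
      · omega
    · rename_i hc
      obtain ⟨j, hij, hj, hv⟩ := hex
      have hil : i < a.length := by omega
      have : ¬ a.getD i 0 ≠ v := fun hne => hc ⟨hil, hne⟩
      rw [List.getD_eq_getElem a 0 hil] at this
      exact ⟨hil, by tauto⟩

theorem loop2_spec (instantiation : List Int) : ∀ (c d : List Int) (k : Nat)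
    (a : List Int) (cnt : PySem.Dict Int Int) (idx : List Int) (m : Int),
    c.length = d.length →
    (∀ j, getElem? c j = (getElem? d j).map (fun x => if x = instantiation.getD (k + j) 0 ∨ x = -1 then -1 else x)) →
    (∀ v, v ≠ -1 → cnt.getD v 0 = (a.count v : Int)) →
    m = (idx.length : Int) →
    (let rA := (PySem.List.enumerate c (k : Int)).foldl
        (fun (s : List Int × List Int × Int) (p : Int × Int) =>
          if p.2 ≠ -1 then
            let i := mfind s.1 p.2 0
            if i < s.1.length then (s.1.set i (-1), s.2.1 ++ [p.1], s.2.2 + 1)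
            else s
          else s)
        (a, (idx, m));
     let rB := (PySem.List.enumerate d (k : Int)).foldl
        (fun (s : PySem.Dict Int Int × List Int) (p : Int × Int) =>
          if p.2 ≠ -1 ∧ p.2 ≠ PySem.List.pyGetD instantiation p.1 0 ∧ s.1.getD p.2 0 > 0 then
            (s.1.insert p.2 (s.1.getD p.2 0 - 1), s.2 ++ [p.1])
          else s)
        (cnt, idx);
     rA.2.1 = rB.2 ∧ rA.2.2 = (rB.2.length : Int)) := by
  intro c
  induction c with
  | nil =>
    intro d k a cnt idx m hlen hrel hinv hm
    have hd : d = [] := List.eq_nil_of_length_eq_zero (by simpa using hlen.symm)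
    subst hd
    simp only [PySem.List.enumerate_nil, List.foldl_nil]
    exact ⟨trivial, hm⟩
  | cons c0 c' ih =>
    intro d k a cnt idx m hlen hrel hinv hm
    obtain ⟨d0, d', rfl⟩ : ∃ d0 d', d = d0 :: d' := by
      cases d with
      | nil => simp at hlen
      | cons d0 d' => exact ⟨d0, d', rfl⟩
    have hc0 : c0 = if d0 = instantiation.getD (k + 0) 0 ∨ d0 = -1 then -1 else d0 := by
      have := hrel 0
      simpa using this
    rw [Nat.add_zero] at hc0
    have hrel' : ∀ j, getElem? c' j = (getElem? d' j).map
        (fun x => if x = instantiation.getD (k + 1 + j) 0 ∨ x = -1 then -1 else x) := by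
      intro j
      have := hrel (j + 1)
      rw [show k + (j + 1) = k + 1 + j by omega] at this
      simpa using this
    simp only [PySem.List.enumerate_cons, List.foldl_cons]
    rw [show (k : Int) + 1 = ((k + 1 : Nat) : Int) by push_cast; ring]
    simp only [PySem.List.pyGetD_natCast]
    by_cases hskip : d0 = instantiation.getD k 0 ∨ d0 = -1
    · have hc0' : c0 = -1 := by rw [hc0, if_pos hskip]
      rw [if_neg (not_not_intro hc0')]
      rw [if_neg (by
        rintro ⟨h1, h2, h3⟩
        rcases hskip with h | h
        · exact h2 h
        · exact h1 h)]
      exact ih d' (k+1) a cnt idx m (by simp at hlen ⊢; omega) hrel' hinv hm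
    · push_neg at hskip
      have hd0e : d0 ≠ instantiation.getD k 0 := hskip.1
      have hd0ne : d0 ≠ -1 := hskip.2
      have hc0' : c0 = d0 := by rw [hc0, if_neg (by tauto)]
      rw [hc0']
      rw [if_pos hd0ne]
      by_cases hmem : d0 ∈ a
      · obtain ⟨n, hn, hvn⟩ := List.mem_iff_getElem.mp hmem
        obtain ⟨hmlt, hmval⟩ := mfind_found a d0 0 ⟨n, Nat.zero_le _, hn, hvn⟩
        have hcntpos : cnt.getD d0 0 > 0 := by
          rw [hinv d0 hd0ne]
          exact_mod_cast List.count_pos_iff.mpr hmem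
        rw [if_pos hmlt]
        rw [if_pos ⟨hd0ne, hd0e, hcntpos⟩]
        apply ih d' (k+1) (a.set (mfind a d0 0) (-1))
          (cnt.insert d0 (cnt.getD d0 0 - 1)) (idx ++ [(k : Int)]) (m + 1)
          (by simp at hlen ⊢; omega) hrel'
        · intro v hv
          rw [PySem.Dict.getD_insert]
          have hcse := count_set_eq a (mfind a d0 0) hmlt (-1) v
          by_cases hvd : v = d0
          · subst hvd
            rw [if_pos rfl, hinv v hv]
            rw [hmval, if_pos rfl, if_neg (fun h => hv h.symm)] at hcse
            have hpos : 0 < a.count v := List.count_pos_iff.mpr hmem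
            omega
          · rw [if_neg hvd, hinv v hv]
            rw [hmval, if_neg (fun h => hvd h.symm), if_neg (fun h => hv h.symm)] at hcse
            omega
        · simp [hm]
      · have hnf : mfind a d0 0 = a.length := by
          apply mfind_not_mem a d0 0 (Nat.zero_le _)
          intro j _ hj hvj
          exact hmem (hvj ▸ List.getElem_mem hj)
        rw [hnf, if_neg (lt_irrefl a.length)]
        rw [if_neg (by
          rintro ⟨_, _, h3⟩
          rw [hinv d0 hd0ne, List.count_eq_zero_of_not_mem hmem] at h3
          simp at h3)]
        exact ih d' (k+1) a cnt idx m (by simp at hlen ⊢; omega) hrel' hinv hm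

theorem maskB_getElem (d e : List Int) (hle : d.length ≤ e.length) : ∀ (j : Nat),
    getElem? (maskB d e) j
      = (getElem? d j).map (fun x => if x = e.getD j 0 ∨ x = -1 then -1 else x) := by
  induction d generalizing e with
  | nil => intro j; simp [maskB]
  | cons d0 d' ih =>
    intro j
    cases e with
    | nil => simp at hle
    | cons e0 e' =>
      rw [maskB_cons]
      cases j with
      | zero => simp
      | succ j =>
        simp only [List.getElem?_cons_succ, List.getD_cons_succ]
        exact ih e' (by simp at hle ⊢; omega) j

theorem length_maskB (d e : List Int) : (maskB d e).length = min d.length e.length := by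
  simp [maskB]

-- ===== VERDICT (by name: the statement is the Claim_ definition above) =====
theorem misplaced_2_spec : Claim_equal_misplaced_2 := by
  intro instantiation proposition _ hpre
  unfold Pre_misplaced_2 at hpre
  unfold Spec_misplaced_2
  have hpass := pass1_spec proposition 0 instantiation proposition
    (by simpa using hpre) (by simp)
    (by intro j hj; simp)
  simp only [Nat.cast_zero, List.take_zero, List.drop_zero, List.nil_append, Nat.zero_add,
    List.drop_length, List.append_nil] at hpass
  have hcnt := counts_spec proposition instantiation 0 PySem.Dict.empty
  simp only [Nat.cast_zero, List.drop_zero, PySem.Dict.getD_empty, zero_add] at hcnt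
  have hloop := loop2_spec instantiation (maskB proposition instantiation) proposition 0
    (amaskB instantiation proposition)
    ((PySem.List.enumerate instantiation 0).foldl
      (fun (c : PySem.Dict Int Int) (p : Int × Int) =>
        if ¬ (p.1 < (proposition.length : Int) ∧ (PySem.List.pyGetD proposition p.1 0 = p.2 ∨ PySem.List.pyGetD proposition p.1 0 = -1)) then
          c.insert p.2 (c.getD p.2 0 + 1)
        else c)
      PySem.Dict.empty)
    [] 0
    (by rw [length_maskB]; omega)
    (by intro j; simpa using maskB_getElem proposition instantiation hpre j)
    (by intro v hv; exact hcnt v hv)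
    (by simp)
  simp only [Nat.cast_zero] at hloop
  obtain ⟨h1, h2⟩ := hloop
  simp only [misplaced_2, misplaced_2_alt]
  rw [hpass]
  rw [h1, h2]
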